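-- pv_equiv track=rewrite | github.com/simonkp/community-crisis-predictor | src/narration/narrative_generator.py | _playbook_action_for_state
-- ===== SOURCE A (Python) =====
-- def _playbook_action_for_state(playbook: str, state: str) -> str:
--     """First bullet under the ## heading that contains the state name."""
--     lines = playbook.splitlines()
--     in_section = False
--     for line in lines:
--         stripped = line.strip()
--         if stripped.startswith("## "):
--             in_section = state in stripped
--             continue
--         if in_section:
--             if stripped.startswith("## "):
--                 break
--             if stripped.startswith("- ") and len(stripped) > 2:
--                 return stripped[2:].strip()
--     return "Review the moderation playbook for this signal level."
-- ===== SOURCE B (Python) =====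
-- def _playbook_action_for_state(playbook: str, state: str) -> str:
--     """First bullet under the ## heading that contains the state name."""
--     lines = [line.strip() for line in playbook.splitlines()]
--     for heading, body in _sections(lines):
--         if state in heading:
--             bullet = _first_bullet(body)
--             if bullet is not None:
--                 return bullet
--     return "Review the moderation playbook for this signal level."
--
--
-- def _sections(lines):
--     """Group pre-stripped lines into (heading, body_lines) sections;
--     lines before the first '## ' heading belong to no section and are dropped."""
--     sections = []
--     i = 0
--     while i < len(lines):
--         if lines[i].startswith("## "):
--             j = i + 1
--             while j < len(lines) and not lines[j].startswith("## "):
--                 j += 1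
--             sections.append((lines[i], lines[i + 1:j]))
--             i = j
--         else:
--             i += 1
--     return sections
--
--
-- def _first_bullet(body):
--     for s in body:
--         if s.startswith("- ") and len(s) > 2:
--             return s[2:].strip()
--     return None
-- ===== Notes on version B (the rewrite author's own statement) =====
-- stated objective: alternative
-- what changed: Replaced A's single flag-driven scan with a two-phase structure: first parse the playbook into (heading, body) sections, then search the matching sections in order for their first bullet.
import Mathlib
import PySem

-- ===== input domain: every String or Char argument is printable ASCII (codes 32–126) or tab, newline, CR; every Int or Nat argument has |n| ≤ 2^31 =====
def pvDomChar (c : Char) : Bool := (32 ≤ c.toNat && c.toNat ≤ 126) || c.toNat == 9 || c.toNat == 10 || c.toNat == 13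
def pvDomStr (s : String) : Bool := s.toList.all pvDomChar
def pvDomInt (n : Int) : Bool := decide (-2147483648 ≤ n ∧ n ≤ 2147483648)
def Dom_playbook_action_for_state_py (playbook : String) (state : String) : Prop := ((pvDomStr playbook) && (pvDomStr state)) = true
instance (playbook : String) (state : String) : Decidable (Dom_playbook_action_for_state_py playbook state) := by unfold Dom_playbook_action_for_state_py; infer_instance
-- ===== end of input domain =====

-- B is an alternative decomposition of A (parse into sections, then search them); same result, same cost.

-- ===== PORT A =====
-- A's single scan with an in_section flag; the inner '## ' check (Python's dead `break`) is kept for fidelity.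
def pvALoop (state : String) : List String → Bool → String
  | [], _ => "Review the moderation playbook for this signal level."
  | line :: rest, inS =>
    let stripped := PySem.Str.strip line
    if PySem.Str.startswith stripped "## " then
      pvALoop state rest (PySem.Str.isIn state stripped)
    else if inS then
      if PySem.Str.startswith stripped "## " then
        "Review the moderation playbook for this signal level."
      else if PySem.Str.startswith stripped "- " && decide (2 < PySem.Str.len stripped) then
        PySem.Str.strip (PySem.Str.slice stripped (some 2) none)
      else pvALoop state rest inS
    else pvALoop state rest inS

def playbook_action_for_state_py (playbook : String) (state : String) : String :=
  pvALoop state (PySem.Str.splitlines playbook) false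

-- ===== PORT B =====
def pvNotHeading (t : String) : Bool := !PySem.Str.startswith t "## "

-- Source B's _sections: the inner while-scan to the next heading is takeWhile/dropWhile
def pvSections : List String → List (String × List String)
  | [] => []
  | s :: rest =>
    if PySem.Str.startswith s "## " then
      (s, rest.takeWhile pvNotHeading) :: pvSections (rest.dropWhile pvNotHeading)
    else pvSections rest
  termination_by ls => ls.length
  decreasing_by
    · exact Nat.lt_succ_of_le (List.length_dropWhile_le _ _)
    · simp

-- Source B's _first_bullet
def pvFirstBullet : List String → Option String
  | [] => none
  | s :: rest =>
    if PySem.Str.startswith s "- " && decide (2 < PySem.Str.len s) then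
      some (PySem.Str.strip (PySem.Str.slice s (some 2) none))
    else pvFirstBullet rest

-- Source B's outer loop over sections
def pvSearch (state : String) : List (String × List String) → String
  | [] => "Review the moderation playbook for this signal level."
  | (h, body) :: rest =>
    if PySem.Str.isIn state h then
      match pvFirstBullet body with
      | some r => r
      | none => pvSearch state rest
    else pvSearch state rest

def playbook_action_for_state_py_alt (playbook : String) (state : String) : String :=
  pvSearch state (pvSections ((PySem.Str.splitlines playbook).map PySem.Str.strip))

-- ===== PRECONDITION & SPEC =====
def Spec_playbook_action_for_state_py (playbook : String) (state : String) (out : String) : Prop := out = playbook_action_for_state_py_alt playbook state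
instance (playbook : String) (state : String) (out : String) : Decidable (Spec_playbook_action_for_state_py playbook state out) := by unfold Spec_playbook_action_for_state_py; infer_instance

-- ===== CLAIM (what is proved, stated in full; the proofs are below) =====
def Claim_equal_playbook_action_for_state_py : Prop := ∀ (playbook : String) (state : String), Dom_playbook_action_for_state_py playbook state → Spec_playbook_action_for_state_py playbook state (playbook_action_for_state_py playbook state)

-- ===== LEMMAS AND PROOFS =====

-- A's loop on pre-stripped lines (proof-only helper)
def pvSLoop (state : String) : List String → Bool → String
  | [], _ => "Review the moderation playbook for this signal level."
  | s :: rest, inS =>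
    if PySem.Str.startswith s "## " then
      pvSLoop state rest (PySem.Str.isIn state s)
    else if inS then
      if PySem.Str.startswith s "## " then
        "Review the moderation playbook for this signal level."
      else if PySem.Str.startswith s "- " && decide (2 < PySem.Str.len s) then
        PySem.Str.strip (PySem.Str.slice s (some 2) none)
      else pvSLoop state rest inS
    else pvSLoop state rest inS

theorem pvALoop_eq_pvSLoop (state : String) (ls : List String) (b : Bool) :
    pvALoop state ls b = pvSLoop state (ls.map PySem.Str.strip) b := by
  induction ls generalizing b with
  | nil => rfl
  | cons l rest ih =>
    simp only [pvALoop, pvSLoop, List.map_cons]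
    split_ifs <;> simp [ih]

theorem pvSLoop_skip (state : String) (body rest : List String)
    (h : ∀ l ∈ body, pvNotHeading l = true) :
    pvSLoop state (body ++ rest) false = pvSLoop state rest false := by
  induction body with
  | nil => rfl
  | cons s tl ih =>
    have hs : PySem.Chars.startswith s.toList ['#', '#', ' '] = false := by
      have := h s (List.mem_cons_self ..)
      simpa [pvNotHeading] using this
    simp only [List.cons_append, pvSLoop]
    simp [hs]
    exact ih (fun l hl => h l (List.mem_cons_of_mem _ hl))

theorem pvSLoop_true (state : String) (ls : List String) :
    pvSLoop state ls true =
      match pvFirstBullet (ls.takeWhile pvNotHeading) with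
      | some r => r
      | none => pvSLoop state (ls.dropWhile pvNotHeading) false := by
  induction ls with
  | nil => rfl
  | cons s rest ih =>
    by_cases hh : PySem.Chars.startswith s.toList ['#', '#', ' '] = true
    · simp [pvSLoop, pvNotHeading, pvFirstBullet, hh]
    · by_cases hb : PySem.Chars.startswith s.toList ['-', ' '] = true ∧ 2 < s.length
      · simp [pvSLoop, pvNotHeading, pvFirstBullet, hh, hb]
      · simp [pvSLoop, pvNotHeading, pvFirstBullet, hh, hb, ih]

theorem pvSLoop_false_eq_pvSearch (state : String) (ls : List String) :
    pvSLoop state ls false = pvSearch state (pvSections ls) := by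
  induction ls using pvSections.induct with
  | case1 => simp [pvSLoop, pvSections, pvSearch]
  | case2 s rest hh ih =>
    have hdecomp : rest = rest.takeWhile pvNotHeading ++ rest.dropWhile pvNotHeading :=
      (List.takeWhile_append_dropWhile (p := pvNotHeading) (l := rest)).symm
    simp only [pvSLoop, pvSections, pvSearch, hh, if_true]
    by_cases hin : PySem.Str.isIn state s = true
    · rw [hin, if_pos rfl, pvSLoop_true]
      cases hfb : pvFirstBullet (rest.takeWhile pvNotHeading) with
      | some r => simp
      | none => simp [ih]
    · have hin' : PySem.Str.isIn state s = false := by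
        simpa using hin
      rw [hin']
      simp only [Bool.false_eq_true, if_false]
      conv_lhs => rw [hdecomp]
      rw [pvSLoop_skip state _ _ (fun l hl => List.mem_takeWhile_imp hl)]
      exact ih
  | case3 s rest hh ih =>
    have hs : PySem.Str.startswith s "## " = false := by simpa using hh
    simp only [pvSLoop, pvSections, hs, Bool.false_eq_true, if_false]
    exact ih

-- ===== VERDICT (by name: the statement is the Claim_ definition above) =====
theorem playbook_action_for_state_py_spec : Claim_equal_playbook_action_for_state_py := by
  intro playbook state _
  unfold Spec_playbook_action_for_state_py playbook_action_for_state_py playbook_action_for_state_py_alt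
  rw [pvALoop_eq_pvSLoop, pvSLoop_false_eq_pvSearch]
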